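-- pv_equiv track=rewrite | github.com/csaatechnicalarts/rust-creative-coding-workbook | raylib-alpha-rangoli/src/Alphabet_Rangoli.py | print_line
-- ===== SOURCE A (Python) =====
-- import string
--
-- def print_line(n: int, m: int) -> str:
--     lowercase_alpha = string.ascii_lowercase
--     list_la = (lowercase_alpha)
--
--     r_line = []
--     i = n
--     while i > m:
--         r_line.append(list_la[i])
--         i -= 1
--
--     for j in range(i+2, n+1):
--         r_line.append(list_la[j])
--
--     return '-'.join(r_line)
-- ===== SOURCE B (Python) =====
-- import string
--
-- def print_line(n: int, m: int) -> str:
--     # Build only the descending half, then mirror it (minus the shared middle).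
--     la = string.ascii_lowercase
--     half = [la[k] for k in range(n, m, -1)]
--     r_line = half + half[-2::-1]
--     return '-'.join(r_line)
-- ===== Notes on version B (the rewrite author's own statement) =====
-- stated objective: simpler
-- what changed: B builds only the descending half of the line as a comprehension and forms the full line by mirroring it (half + half[-2::-1]), replacing A's while loop plus second index-driven ascending loop.
-- outside the precondition, e.g. on print_line(26, 0): A raises IndexError, B raises IndexError; on print_line(5, -30): A raises IndexError, B raises IndexError
import Mathlib
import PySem

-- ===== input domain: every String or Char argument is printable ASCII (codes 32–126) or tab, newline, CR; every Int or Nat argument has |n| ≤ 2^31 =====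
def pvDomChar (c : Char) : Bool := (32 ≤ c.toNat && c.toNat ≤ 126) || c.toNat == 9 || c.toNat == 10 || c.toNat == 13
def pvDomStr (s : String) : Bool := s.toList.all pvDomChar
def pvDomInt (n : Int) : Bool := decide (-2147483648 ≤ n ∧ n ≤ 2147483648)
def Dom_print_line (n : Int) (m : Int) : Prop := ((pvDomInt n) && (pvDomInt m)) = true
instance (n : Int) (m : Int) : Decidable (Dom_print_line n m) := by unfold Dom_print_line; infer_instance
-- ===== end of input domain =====

-- B builds only the descending half of the rangoli line and mirrors it (half + half[-2::-1])
-- instead of A's second index-driven ascending loop; objective: simpler.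


-- string.ascii_lowercase
def pvAlpha : List Char := "abcdefghijklmnopqrstuvwxyz".toList

-- list_la[i] as a 1-char string; the .getD is unreachable under Pre_ (Python raises IndexError there)
def pvChr (i : Int) : String := String.ofList [(PySem.List.pyGet? pvAlpha i).getD ' ']

-- ===== PORT A =====
-- the while loop: fuel = (i - m).toNat makes it total without changing the computation
def pvLoopA : Nat → Int → Int → List String → List String × Int
  | 0, _, i, acc => (acc, i)
  | fuel + 1, m, i, acc =>
    if i > m then pvLoopA fuel m (i - 1) (acc ++ [pvChr i]) else (acc, i)

def print_line (n : Int) (m : Int) : String :=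
  let st := pvLoopA (n - m).toNat m n []
  let r_line := (PySem.List.pyRange (st.2 + 2) (n + 1) 1).foldl
    (fun acc j => acc ++ [pvChr j]) st.1
  PySem.Str.join "-" r_line

-- ===== PORT B =====
def print_line_alt (n : Int) (m : Int) : String :=
  let half := (PySem.List.pyRange n m (-1)).map pvChr
  let r_line := half ++ (PySem.List.slice? half (some (-2)) none (-1)).getD []
  PySem.Str.join "-" r_line

-- ===== PRECONDITION & SPEC =====
-- Pre_ excludes exactly the inputs where Python A raises IndexError (an alphabet index outside [-26, 25] is reached)
def Pre_print_line (n : Int) (m : Int) : Prop := n ≤ m ∨ (n ≤ 25 ∧ -27 ≤ m)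
instance (n : Int) (m : Int) : Decidable (Pre_print_line n m) := by unfold Pre_print_line; infer_instance
def pvWitness_print_line : Int × Int := (4, 1)

def Spec_print_line (n : Int) (m : Int) (out : String) : Prop := out = print_line_alt n m
instance (n : Int) (m : Int) (out : String) : Decidable (Spec_print_line n m out) := by unfold Spec_print_line; infer_instance

-- ===== CLAIM (what is proved, stated in full; the proofs are below) =====
def Claim_equal_print_line : Prop := ∀ (n : Int) (m : Int), Dom_print_line n m → Pre_print_line n m → Spec_print_line n m (print_line n m)

-- ===== LEMMAS AND PROOFS =====

-- a list is the range-map of its own getD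
theorem pv_map_getD_range {α : Type} (l : List α) (d : α) :
    (List.range l.length).map (fun k => l.getD k d) = l := by
  apply List.ext_getElem
  · simp
  · intro i h1 h2
    simp [List.getElem?_eq_getElem h2]

-- xs[-2::-1] = reversed xs without its (reversed) first element
theorem pv_slice_neg2_rev {α : Type} [Inhabited α] (xs : List α) :
    PySem.List.slice? xs (some (-2)) none (-1) = some xs.dropLast.reverse := by
  by_cases h : 2 ≤ xs.length
  · have hlen : (1:Int) < xs.length := by exact_mod_cast h
    have hmax : max (-2 + (xs.length:Int)) (-1) = (xs.length:Int) - 2 := by omega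
    simp only [PySem.List.slice?, PySem.List.sliceIndices]
    norm_num [hmax, hlen.not_ge]
    have hcnt : ((xs.length:Int) - 2 + 1).toNat = xs.length - 1 := by omega
    have hif : (if (2:Int) < 1 + xs.length then ((xs.length:Int) - 2 + 1).toNat else 0) = xs.length - 1 := by
      split <;> omega
    rw [hif]
    have hrev : ∀ k ∈ List.range (xs.length - 1),
        xs[((xs.length:Int) - 2 + -(k:Int)).toNat]? = some (xs.dropLast.reverse.getD k default) := by
      intro k hk
      simp only [List.mem_range] at hk
      have h1 : ((xs.length:Int) - 2 + -(k:Int)).toNat = xs.length - 2 - k := by omega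
      rw [h1]
      have h2 : xs.length - 2 - k < xs.length := by omega
      have h3 : k < xs.dropLast.reverse.length := by simp; omega
      rw [List.getElem?_eq_getElem h2, List.getD_eq_getElem _ _ h3]
      congr 1
      rw [List.getElem_reverse, List.getElem_dropLast]
      congr 1
      simp
      omega
    rw [List.filterMap_congr hrev,
      show (fun x => some (xs.dropLast.reverse.getD x default)) =
        some ∘ (fun x => xs.dropLast.reverse.getD x default) from rfl,
      List.filterMap_eq_map]
    have := pv_map_getD_range xs.dropLast.reverse default
    simpa using this
  · rcases xs with _ | ⟨x, _ | ⟨y, t⟩⟩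
    · rfl
    · simp [PySem.List.slice?, PySem.List.sliceIndices]
    · simp at h

-- A's while loop appends the descending characters and ends with i = min i m
theorem pv_loopA_eq (fuel : Nat) (m : Int) : ∀ (i : Int) (acc : List String),
    (i - m).toNat ≤ fuel →
    pvLoopA fuel m i acc = (acc ++ (PySem.List.pyRange i m (-1)).map pvChr, min i m) := by
  induction fuel with
  | zero =>
    intro i acc h
    have him : i ≤ m := by omega
    simp [pvLoopA, PySem.List.pyRange_neg_one_eq_nil him, min_eq_left him]
  | succ fuel ih =>
    intro i acc h
    by_cases hgt : i > m
    · rw [pvLoopA, if_pos hgt, ih (i - 1) (acc ++ [pvChr i]) (by omega),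
        PySem.List.pyRange_neg_one_cons hgt]
      simp [min_eq_right (le_of_lt hgt), min_eq_right (by omega : m ≤ i - 1)]
    · have him : i ≤ m := by omega
      simp [pvLoopA, hgt, PySem.List.pyRange_neg_one_eq_nil him, min_eq_left him]

-- ===== VERDICT (by name: the statement is the Claim_ definition above) =====
theorem print_line_spec : Claim_equal_print_line := by
  intro n m _ _
  unfold Spec_print_line print_line print_line_alt
  rw [pv_loopA_eq (n - m).toNat m n [] (by omega)]
  simp only [List.nil_append, PySem.List.foldl_append_singleton_eq_map,
    pv_slice_neg2_rev, Option.getD_some]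
  congr 1
  by_cases hnm : n ≤ m
  · rw [PySem.List.pyRange_neg_one_eq_nil hnm, min_eq_left hnm,
      PySem.List.pyRange_one_eq_nil (by omega : n + 1 ≤ n + 2)]
    simp
  · have hmn : m < n := by omega
    rw [min_eq_right (le_of_lt hmn), PySem.List.pyRange_neg_one_eq_reverse,
      ← List.map_dropLast, List.dropLast_reverse, ← List.map_reverse, List.reverse_reverse,
      PySem.List.pyRange_one_cons (by omega : m + 1 < n + 1)]
    simp [show m + 1 + 1 = m + 2 by ring]
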